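-- pv_equiv track=rewrite | github.com/YassirTHC/PIPELINE_final_2 | pipeline_core/llm_service.py | _build_provider_queries_from_terms
-- ===== SOURCE A (Python) =====
-- from typing import Any, Dict, Iterable, List, Optional, Sequence, Set, Tuple, TYPE_CHECKING
--
-- _PROVIDER_QUERY_TEMPLATES: Tuple[str, ...] = (
--     "{kw} stock b-roll",
--     "{kw} stock footage",
--     "{kw} cinematic b-roll",
--     "teamwork {kw}",
--     "{kw} cinematic video",
--     "{kw} background footage",
-- )
--
-- def _build_provider_queries_from_terms(terms: Sequence[str]) -> List[str]:
--     queries: List[str] = []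
--     seen: Set[str] = set()
--     for term in terms:
--         if not term:
--             continue
--         for template in _PROVIDER_QUERY_TEMPLATES:
--             candidate = template.format(kw=term).strip()
--             if not candidate:
--                 continue
--             normalized = " ".join(candidate.split()).lower()
--             if normalized in seen:
--                 continue
--             seen.add(normalized)
--             queries.append(normalized)
--             if len(queries) >= 12:
--                 return queries[:12]
--     return queries[:12]
-- ===== SOURCE B (Python) =====
-- from typing import List, Sequence, Tuple
--
-- _PROVIDER_QUERY_TEMPLATES: Tuple[str, ...] = (
--     "{kw} stock b-roll",
--     "{kw} stock footage",
--     "{kw} cinematic b-roll",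
--     "teamwork {kw}",
--     "{kw} cinematic video",
--     "{kw} background footage",
-- )
--
-- def _build_provider_queries_from_terms(terms: Sequence[str]) -> List[str]:
--     candidates = [
--         " ".join(c.split()).lower()
--         for term in terms
--         if term
--         for template in _PROVIDER_QUERY_TEMPLATES
--         if (c := template.format(kw=term).strip())
--     ]
--     # nub: repeatedly take the first remaining candidate and purge all of its
--     # duplicates from the rest; no seen-set or dict is ever consulted.
--     queries: List[str] = []
--     while candidates and len(queries) < 12:
--         head = candidates[0]
--         queries.append(head)
--         candidates = [c for c in candidates[1:] if c != head]
--     return queries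
-- ===== Notes on version B (the rewrite author's own statement) =====
-- stated objective: alternative
-- what changed: A's fused streaming pass (seen-set membership test, conditional append, early return at 12) is replaced by generate-all-candidates followed by a Haskell-style nub: repeatedly take the first remaining candidate and filter every duplicate of it out of the rest, with no set or dict at all, stopping once 12 distinct queries are collected.
import Mathlib
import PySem

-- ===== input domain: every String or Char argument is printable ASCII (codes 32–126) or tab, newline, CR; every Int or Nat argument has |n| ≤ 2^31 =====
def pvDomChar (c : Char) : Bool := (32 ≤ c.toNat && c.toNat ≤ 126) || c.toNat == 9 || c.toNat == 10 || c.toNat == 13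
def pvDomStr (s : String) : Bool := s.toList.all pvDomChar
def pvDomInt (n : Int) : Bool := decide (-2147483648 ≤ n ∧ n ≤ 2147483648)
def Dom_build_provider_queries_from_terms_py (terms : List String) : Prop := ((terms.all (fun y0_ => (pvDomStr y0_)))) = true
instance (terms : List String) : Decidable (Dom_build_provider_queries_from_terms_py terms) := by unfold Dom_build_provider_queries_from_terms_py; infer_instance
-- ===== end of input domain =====

-- B replaces A's fused streaming pass (seen-set, conditional append, early return at 12)
-- by generate-all-candidates followed by a nub loop: repeatedly take the first remaining
-- candidate and filter its duplicates out of the rest, no set or dict (objective: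
-- alternative). Return value only; neither version mutates its argument.

-- ===== PORT A =====
-- _PROVIDER_QUERY_TEMPLATES: each "{kw}…" template as (prefix, suffix); template.format(kw=t) = prefix ++ t ++ suffix
def pvTemplates : List (String × String) :=
  [("", " stock b-roll"), ("", " stock footage"), ("", " cinematic b-roll"),
   ("teamwork ", ""), ("", " cinematic video"), ("", " background footage")]

-- " ".join(candidate.split()).lower()
def pvNorm (c : String) : String :=
  PySem.Str.lower (PySem.Str.join " " (PySem.Str.split₀ c))

-- one iteration of A's inner 'for template in _PROVIDER_QUERY_TEMPLATES' loop;
-- the Bool flag is the early 'return queries[:12]'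
def pvStepA (term : String) (st : List String × PySem.Set String × Bool)
    (tpl : String × String) : List String × PySem.Set String × Bool :=
  match st with
  | (queries, seen, done) =>
    if done then (queries, seen, done)
    else
      let candidate := PySem.Str.strip (tpl.1 ++ term ++ tpl.2)
      if candidate = "" then (queries, seen, done)
      else
        let normalized := pvNorm candidate
        if (seen : List String).contains normalized then (queries, seen, done)
        else
          let queries' := queries ++ [normalized]
          (queries', PySem.Set.add seen normalized, decide (12 ≤ queries'.length))

-- A's outer 'for term in terms' loop
def pvLoopA : List String → List String × PySem.Set String → List String
  | [], (queries, _) => PySem.List.slice queries none (some 12)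
  | term :: rest, (queries, seen) =>
    if term = "" then pvLoopA rest (queries, seen)
    else
      match pvTemplates.foldl (pvStepA term) (queries, seen, false) with
      | (queries', seen', done) =>
        if done then PySem.List.slice queries' none (some 12)
        else pvLoopA rest (queries', seen')

def build_provider_queries_from_terms_py (terms : List String) : List String :=
  pvLoopA terms ([], PySem.Set.empty)

-- ===== PORT B =====
-- inner part of B's candidate comprehension: normalized candidates of one (truthy) term
def pvCandidatesOf (term : String) : List String :=
  pvTemplates.filterMap (fun tpl =>
    let c := PySem.Str.strip (tpl.1 ++ term ++ tpl.2)
    if c = "" then none else some (pvNorm c))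

-- the full candidate comprehension
def pvCandidates (terms : List String) : List String :=
  (terms.filter (fun t => t != "")).flatMap pvCandidatesOf

-- B's while loop: take the head, purge its duplicates from the rest, stop at 12
def pvLoopB : List String → List String → List String
  | [], queries => queries
  | c :: cs, queries =>
    if 12 ≤ queries.length then queries
    else pvLoopB (cs.filter (fun x => x ≠ c)) (queries ++ [c])
  termination_by cs _ => cs.length
  decreasing_by
    simp only [List.length_unattach, List.length_cons]
    exact Nat.lt_succ_of_le (le_trans (List.length_filter_le _ _) (by simp))

def build_provider_queries_from_terms_py_alt (terms : List String) : List String :=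
  pvLoopB (pvCandidates terms) []

-- ===== PRECONDITION & SPEC =====
def Spec_build_provider_queries_from_terms_py (terms : List String) (out : List String) : Prop := out = build_provider_queries_from_terms_py_alt terms
instance (terms : List String) (out : List String) : Decidable (Spec_build_provider_queries_from_terms_py terms out) := by unfold Spec_build_provider_queries_from_terms_py; infer_instance

-- ===== CLAIM (what is proved, stated in full; the proofs are below) =====
def Claim_equal_build_provider_queries_from_terms_py : Prop := ∀ (terms : List String), Dom_build_provider_queries_from_terms_py terms → Spec_build_provider_queries_from_terms_py terms (build_provider_queries_from_terms_py terms)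

-- ===== LEMMAS AND PROOFS =====

-- A's inner-loop step, abstracted to act on an already-formatted normalized candidate
def pvFStep (st : List String × PySem.Set String × Bool) (n : String) :
    List String × PySem.Set String × Bool :=
  match st with
  | (queries, seen, done) =>
    if done then (queries, seen, done)
    else if (seen : List String).contains n then (queries, seen, done)
    else
      let queries' := queries ++ [n]
      (queries', PySem.Set.add seen n, decide (12 ≤ queries'.length))

-- fused dedup-and-cap over a candidate stream (what A's two loops jointly compute)
def pvFl : List String → List String → List String
  | [], qs => qs.take 12
  | c :: cs, qs =>
    if qs.contains c then pvFl cs qs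
    else if 12 ≤ (qs ++ [c]).length then (qs ++ [c]).take 12
    else pvFl cs (qs ++ [c])

lemma pvSlice12 (xs : List String) : PySem.List.slice xs none (some 12) = xs.take 12 := by
  simp [pysem]

lemma pvStepA_eq (t : String) (st : List String × PySem.Set String × Bool)
    (tpl : String × String) :
    pvStepA t st tpl =
      (match (if PySem.Str.strip (tpl.1 ++ t ++ tpl.2) = "" then none
              else some (pvNorm (PySem.Str.strip (tpl.1 ++ t ++ tpl.2)))) with
       | none => st
       | some n => pvFStep st n) := by
  rcases st with ⟨q, s, d⟩
  by_cases hc : PySem.Str.strip (tpl.1 ++ t ++ tpl.2) = "" <;>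
    cases d <;> simp [pvStepA, pvFStep, hc]

lemma pvFoldl_stepA_eq (t : String) :
    ∀ (tpls : List (String × String)) (st : List String × PySem.Set String × Bool),
      tpls.foldl (pvStepA t) st =
        (tpls.filterMap (fun tpl =>
          let c := PySem.Str.strip (tpl.1 ++ t ++ tpl.2)
          if c = "" then none else some (pvNorm c))).foldl pvFStep st := by
  intro tpls
  induction tpls with
  | nil => intro st; rfl
  | cons tpl tpls ih =>
    intro st
    by_cases hc : PySem.Str.strip (tpl.1 ++ t ++ tpl.2) = "" <;>
      simp [hc, ih, pvStepA_eq t st tpl]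

lemma pvFoldl_fstep_done (cs : List String) (q : List String) (s : PySem.Set String) :
    cs.foldl pvFStep (q, s, true) = (q, s, true) := by
  induction cs with
  | nil => rfl
  | cons c cs ih => simpa [pvFStep] using ih

lemma pvFStep_char :
    ∀ (cs rest qs : List String), qs.length < 12 →
      (match cs.foldl pvFStep (qs, qs, false) with
       | (q', s', d) =>
         s' = q' ∧ q'.length ≤ 12 ∧ d = decide (12 ≤ q'.length) ∧
           pvFl (cs ++ rest) qs = (if d then q'.take 12 else pvFl rest q')) := by
  intro cs
  induction cs with
  | nil =>
    intro rest qs h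
    simp only [List.foldl_nil]
    exact ⟨trivial, by omega, by simp; omega, by simp⟩
  | cons c cs ih =>
    intro rest qs h
    by_cases hmem : c ∈ qs
    · have hstep : pvFStep (qs, qs, false) c = (qs, qs, false) := by
        simp [pvFStep, hmem]
      simpa [pvFl, hmem, hstep] using ih rest qs h
    · have hadd : PySem.Set.add qs c = qs ++ [c] := by simp [PySem.Set.add, hmem]
      by_cases h12 : 11 ≤ qs.length
      · have hstep : pvFStep (qs, qs, false) c = (qs ++ [c], qs ++ [c], true) := by
          simp [pvFStep, hmem]; omega
        simp only [List.foldl_cons, hstep, pvFoldl_fstep_done]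
        refine ⟨trivial, by simp; omega, by simp; omega, ?_⟩
        simp [pvFl, hmem, h12]
      · have hstep : pvFStep (qs, qs, false) c = (qs ++ [c], qs ++ [c], false) := by
          simp [pvFStep, hmem]; omega
        have hlen : (qs ++ [c]).length < 12 := by simp; omega
        have hih := ih rest (qs ++ [c]) hlen
        simp only [List.foldl_cons, hstep]
        rcases hfold : (cs.foldl pvFStep (qs ++ [c], qs ++ [c], false)) with ⟨q', s', d⟩
        rw [hfold] at hih
        exact ⟨hih.1, hih.2.1, hih.2.2.1, by simp [pvFl, hmem, h12, hih.2.2.2]⟩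

lemma pvFoldl_add_prefix :
    ∀ (cs qs : List String), ∃ r, cs.foldl PySem.Set.add qs = qs ++ r := by
  intro cs
  induction cs with
  | nil => exact fun qs => ⟨[], by simp⟩
  | cons c cs ih =>
    intro qs
    by_cases hmem : c ∈ qs
    · have hadd : PySem.Set.add qs c = qs := by simp [PySem.Set.add, hmem]
      simpa [hadd] using ih qs
    · have hadd : PySem.Set.add qs c = qs ++ [c] := by simp [PySem.Set.add, hmem]
      obtain ⟨r, hr⟩ := ih (qs ++ [c])
      exact ⟨[c] ++ r, by simp [hadd, hr]⟩

lemma pvFl_eq_dedup :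
    ∀ (cs qs : List String), pvFl cs qs = (cs.foldl PySem.Set.add qs).take 12 := by
  intro cs
  induction cs with
  | nil => intro qs; rfl
  | cons c cs ih =>
    intro qs
    by_cases hmem : c ∈ qs
    · have hadd : PySem.Set.add qs c = qs := by simp [PySem.Set.add, hmem]
      simp [pvFl, hmem, ih qs]
    · have hadd : PySem.Set.add qs c = qs ++ [c] := by simp [PySem.Set.add, hmem]
      by_cases h12 : 11 ≤ qs.length
      · obtain ⟨r, hr⟩ := pvFoldl_add_prefix cs (qs ++ [c])
        have htk : (qs ++ c :: r).take 12 = (qs ++ [c]).take 12 := by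
          rw [show qs ++ c :: r = (qs ++ [c]) ++ r by simp]
          exact List.take_append_of_le_length (by simp; omega)
        simp [pvFl, hmem, h12, hr, htk]
      · simp [pvFl, hmem, h12, ih (qs ++ [c])]

lemma pvLoopA_cons (t : String) (ts : List String) (q : List String)
    (s : PySem.Set String) :
    pvLoopA (t :: ts) (q, s) =
      (if t = "" then pvLoopA ts (q, s)
       else
         match pvTemplates.foldl (pvStepA t) (q, s, false) with
         | (q', s', d) =>
           if d then PySem.List.slice q' none (some 12) else pvLoopA ts (q', s')) := rfl

lemma pvLoopA_eq :
    ∀ (terms qs : List String), qs.length < 12 →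
      pvLoopA terms (qs, qs) = pvFl (pvCandidates terms) qs := by
  intro terms
  induction terms with
  | nil =>
    intro qs h
    simp only [pvLoopA, pvCandidates, List.filter_nil, List.flatMap_nil, pvFl]
    exact pvSlice12 qs
  | cons t ts ih =>
    intro qs h
    by_cases ht : t = ""
    · simpa [pvLoopA, ht, pvCandidates] using ih qs h
    · have hcand : pvCandidates (t :: ts) = pvCandidatesOf t ++ pvCandidates ts := by
        simp [pvCandidates, ht]
      have hchar := pvFStep_char (pvCandidatesOf t) (pvCandidates ts) qs h
      rcases hfold : ((pvCandidatesOf t).foldl pvFStep (qs, qs, false)) with ⟨q', s', d⟩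
      rw [hfold] at hchar
      obtain ⟨hs, hle, hd, hfl⟩ := hchar
      have hA : pvTemplates.foldl (pvStepA t) (qs, qs, false) = (q', s', d) := by
        rw [pvFoldl_stepA_eq t]; exact hfold
      cases d with
      | true =>
        rw [pvLoopA_cons, if_neg ht, hA]
        show PySem.List.slice q' none (some 12) = pvFl (pvCandidates (t :: ts)) qs
        rw [hcand, hfl]
        simp [pvSlice12]
      | false =>
        have h12 : q'.length < 12 := by
          have := hd.symm; simp at this; omega
        rw [pvLoopA_cons, if_neg ht, hA]
        show pvLoopA ts (q', s') = pvFl (pvCandidates (t :: ts)) qs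
        rw [hcand, hfl, hs]
        simpa using ih q' h12

-- Set.add skips any element already in the accumulator, so filtering out copies of a
-- member of the accumulator does not change the fold
lemma pvFoldl_add_filter (x : String) :
    ∀ (cs qs : List String), x ∈ qs →
      cs.foldl PySem.Set.add qs = (cs.filter (fun c => c ≠ x)).foldl PySem.Set.add qs := by
  intro cs
  induction cs with
  | nil => intro qs _; rfl
  | cons c cs ih =>
    intro qs hx
    by_cases hcx : c = x
    · subst hcx
      have hadd : PySem.Set.add qs c = qs := by simp [PySem.Set.add, hx]
      simpa [hadd] using ih qs hx
    · have hx' : x ∈ PySem.Set.add qs c := by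
        by_cases hmem : c ∈ qs <;> simp [PySem.Set.add, hmem, hx]
      simp [hcx, ih (PySem.Set.add qs c) hx']

lemma pvLoopB_nil (qs : List String) : pvLoopB [] qs = qs := by
  simp [pvLoopB]

lemma pvLoopB_cons (c : String) (cs qs : List String) :
    pvLoopB (c :: cs) qs =
      if 12 ≤ qs.length then qs
      else pvLoopB (cs.filter (fun x => x ≠ c)) (qs ++ [c]) := by
  rw [pvLoopB.eq_def]

-- B's nub loop computes the first-occurrence dedup capped at 12, given that the
-- remaining candidates are disjoint from the accumulated queries
lemma pvLoopB_eq :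
    ∀ (n : ℕ) (cs qs : List String), cs.length ≤ n → qs.length ≤ 12 →
      (∀ x ∈ cs, x ∉ qs) →
      pvLoopB cs qs = (cs.foldl PySem.Set.add qs).take 12 := by
  intro n
  induction n with
  | zero =>
    intro cs qs hn h12 _
    have : cs = [] := List.eq_nil_of_length_eq_zero (Nat.le_zero.mp hn)
    subst this
    rw [pvLoopB_nil, List.foldl_nil, List.take_of_length_le h12]
  | succ n ih =>
    intro cs qs hn h12 hdisj
    match cs with
    | [] => rw [pvLoopB_nil, List.foldl_nil, List.take_of_length_le h12]
    | c :: cs' =>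
      by_cases hq12 : 12 ≤ qs.length
      · obtain ⟨r, hr⟩ := pvFoldl_add_prefix (c :: cs') qs
        have hqs : qs.length = 12 := le_antisymm h12 hq12
        rw [pvLoopB_cons, if_pos hq12, hr]
        rw [List.take_append_of_le_length (by omega)]
        exact (List.take_of_length_le (by omega)).symm
      · have hcq : c ∉ qs := hdisj c (by simp)
        have hadd : PySem.Set.add qs c = qs ++ [c] := by simp [PySem.Set.add, hcq]
        rw [pvLoopB_cons, if_neg hq12]
        have hlen : (cs'.filter (fun x => x ≠ c)).length ≤ n :=
          le_trans (List.length_filter_le _ _) (by simpa using hn)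
        have hdisj' : ∀ x ∈ cs'.filter (fun x => x ≠ c), x ∉ qs ++ [c] := by
          intro x hx
          rw [List.mem_filter] at hx
          have hxc : x ≠ c := by simpa using hx.2
          have : x ∉ qs := hdisj x (by simp [hx.1])
          simp [this, hxc]
        rw [ih _ _ hlen (by simp; omega) hdisj']
        rw [List.foldl_cons, hadd]
        rw [pvFoldl_add_filter c cs' (qs ++ [c]) (by simp)]

-- ===== VERDICT (by name: the statement is the Claim_ definition above) =====
theorem build_provider_queries_from_terms_py_spec : Claim_equal_build_provider_queries_from_terms_py := by
  intro terms _
  unfold Spec_build_provider_queries_from_terms_py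
  have h1 : build_provider_queries_from_terms_py terms = pvFl (pvCandidates terms) [] :=
    pvLoopA_eq terms [] (by norm_num)
  have h2 : build_provider_queries_from_terms_py_alt terms =
      ((pvCandidates terms).foldl PySem.Set.add ([] : List String)).take 12 :=
    pvLoopB_eq (pvCandidates terms).length (pvCandidates terms) [] le_rfl (by simp)
      (by simp)
  rw [h1, h2, pvFl_eq_dedup]
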